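-- pv_equiv track=rewrite | github.com/kumasento/gconv-prune | evaluation/iccv19/scripts/export_pretrained_mobilenet.py | get_layer_index
-- ===== SOURCE A (Python) =====
-- def get_layer_index(layer_id):
--   bounds = (1, 3, 5, 7, 13)
--   for idx, b in enumerate(bounds):
--     if layer_id < b:
--       if idx == 0:
--         return 0, 0
--       return idx, layer_id - bounds[idx - 1]
--
--   return len(bounds), layer_id - bounds[-1]
-- ===== SOURCE B (Python) =====
-- def get_layer_index(layer_id):
--     # Binary search for the first bound greater than layer_id (bisect_right
--     # over the sorted tuple), instead of A's linear scan.
--     bounds = (1, 3, 5, 7, 13)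
--     lo, hi = 0, len(bounds)
--     while lo < hi:
--         mid = (lo + hi) // 2
--         if layer_id < bounds[mid]:
--             hi = mid
--         else:
--             lo = mid + 1
--     if lo == 0:
--         return 0, 0
--     return lo, layer_id - bounds[lo - 1]
-- ===== Notes on version B (the rewrite author's own statement) =====
-- stated objective: alternative
-- what changed: Replaces A's linear scan over enumerate(bounds) with a hand-written bisect_right binary search over the same fixed sorted tuple, then one arithmetic formula for the offset.
import Mathlib
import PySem

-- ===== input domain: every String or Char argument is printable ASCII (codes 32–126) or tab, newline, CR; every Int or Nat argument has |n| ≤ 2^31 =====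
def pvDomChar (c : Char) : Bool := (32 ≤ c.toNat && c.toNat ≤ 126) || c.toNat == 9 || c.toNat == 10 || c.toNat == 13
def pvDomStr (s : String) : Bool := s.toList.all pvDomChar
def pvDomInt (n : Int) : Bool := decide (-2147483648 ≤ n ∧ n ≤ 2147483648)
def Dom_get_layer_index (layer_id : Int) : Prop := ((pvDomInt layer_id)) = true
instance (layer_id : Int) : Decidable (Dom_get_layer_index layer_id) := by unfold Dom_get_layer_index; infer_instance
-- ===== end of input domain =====

-- B replaces A's linear scan over the bounds tuple with a hand-written
-- binary search (bisect_right) over the same sorted tuple (objective: alternative).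

-- ===== PORT A =====
-- bounds = (1, 3, 5, 7, 13)
def pvBoundsA : List Int := [1, 3, 5, 7, 13]

-- the for-loop over enumerate(bounds): first (idx, b) with layer_id < b wins
def pvLoopA (layer_id : Int) : List (Int × Int) → Int × Int
  | [] => ((pvBoundsA.length : Int), layer_id - PySem.List.pyGetD pvBoundsA (-1) 0)   -- return len(bounds), layer_id - bounds[-1]
  | (idx, b) :: rest =>
      if layer_id < b then
        if idx = 0 then (0, 0)
        else (idx, layer_id - PySem.List.pyGetD pvBoundsA (idx - 1) 0)   -- bounds[idx-1], idx ≥ 1 here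
      else pvLoopA layer_id rest

def get_layer_index (layer_id : Int) : Int × Int :=
  pvLoopA layer_id (PySem.List.enumerate pvBoundsA)

-- ===== PORT B =====
def pvBoundsB : List Int := [1, 3, 5, 7, 13]

-- the while-loop: exact hand port of Source B's binary search (terminates on hi - lo)
def pvBisect (layer_id : Int) (lo hi : Nat) : Nat :=
  if _h : lo < hi then
    let mid := (lo + hi) / 2
    if layer_id < pvBoundsB.getD mid 0 then pvBisect layer_id lo mid
    else pvBisect layer_id (mid + 1) hi
  else lo
termination_by hi - lo
decreasing_by all_goals omega

def get_layer_index_alt (layer_id : Int) : Int × Int :=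
  let lo := pvBisect layer_id 0 pvBoundsB.length
  if lo = 0 then (0, 0)
  else ((lo : Int), layer_id - pvBoundsB.getD (lo - 1) 0)

-- ===== PRECONDITION & SPEC =====
def Spec_get_layer_index (layer_id : Int) (out : Int × Int) : Prop := out = get_layer_index_alt layer_id
instance (layer_id : Int) (out : Int × Int) : Decidable (Spec_get_layer_index layer_id out) := by unfold Spec_get_layer_index; infer_instance

-- ===== CLAIM (what is proved, stated in full; the proofs are below) =====
def Claim_equal_get_layer_index : Prop := ∀ (layer_id : Int), Dom_get_layer_index layer_id → Spec_get_layer_index layer_id (get_layer_index layer_id)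

-- ===== LEMMAS AND PROOFS =====

-- ===== VERDICT (by name: the statement is the Claim_ definition above) =====
theorem get_layer_index_spec : Claim_equal_get_layer_index := by
  intro layer_id _
  unfold Spec_get_layer_index get_layer_index get_layer_index_alt
  rcases lt_or_ge layer_id 1 with h1 | h1
  · have a3 : layer_id < 3 := by omega
    have a5 : layer_id < 5 := by omega
    have a7 : layer_id < 7 := by omega
    have a13 : layer_id < 13 := by omega
    simp [pvLoopA, PySem.List.enumerate, pvBoundsA, pvBoundsB, pvBisect, h1, a3, a5]
  rcases lt_or_ge layer_id 3 with h2 | h2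
  · have a5 : layer_id < 5 := by omega
    have a7 : layer_id < 7 := by omega
    have a13 : layer_id < 13 := by omega
    simp [pvLoopA, PySem.List.enumerate, PySem.List.pyGetD, PySem.List.pyGet?, PySem.List.pyIdx?, pvBoundsA, pvBoundsB, pvBisect, not_lt.mpr h1, h2, a5]
  rcases lt_or_ge layer_id 5 with h3 | h3
  · have a7 : layer_id < 7 := by omega
    have a13 : layer_id < 13 := by omega
    simp [pvLoopA, PySem.List.enumerate, PySem.List.pyGetD, PySem.List.pyGet?, PySem.List.pyIdx?, pvBoundsA, pvBoundsB, pvBisect, not_lt.mpr h1, not_lt.mpr h2, h3]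
  rcases lt_or_ge layer_id 7 with h4 | h4
  · have a13 : layer_id < 13 := by omega
    simp [pvLoopA, PySem.List.enumerate, PySem.List.pyGetD, PySem.List.pyGet?, PySem.List.pyIdx?, pvBoundsA, pvBoundsB, pvBisect, not_lt.mpr h1, not_lt.mpr h2, not_lt.mpr h3, h4, a13]
  rcases lt_or_ge layer_id 13 with h5 | h5
  · simp [pvLoopA, PySem.List.enumerate, PySem.List.pyGetD, PySem.List.pyGet?, PySem.List.pyIdx?, pvBoundsA, pvBoundsB, pvBisect, not_lt.mpr h1, not_lt.mpr h2, not_lt.mpr h3, not_lt.mpr h4, h5]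
  · simp [pvLoopA, PySem.List.enumerate, PySem.List.pyGetD, PySem.List.pyGet?, PySem.List.pyIdx?, pvBoundsA, pvBoundsB, pvBisect, not_lt.mpr h1, not_lt.mpr h2, not_lt.mpr h3, not_lt.mpr h4, not_lt.mpr h5]
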